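-- pv_equiv track=rewrite | github.com/yuters777/stock-data-mining | backtest_output/stress_mr_v2/stress_mr_part1.py | _get_exit_labels
-- ===== SOURCE A (Python) =====
-- def _get_exit_labels(hm):
--     """Extract ordered exit labels from heat map results."""
--     labels = []
--     seen = set()
--     for (entry, exit_l) in sorted(hm.keys()):
--         if exit_l not in seen:
--             labels.append(exit_l)
--             seen.add(exit_l)
--     return labels
-- ===== SOURCE B (Python) =====
-- def _get_exit_labels(hm):
--     """Extract ordered exit labels from heat map results."""
--     first = {}
--     for key in hm.keys():
--         entry, exit_l = key
--         if exit_l not in first or entry < first[exit_l]: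
--             first[exit_l] = entry
--     return [exit_l for (entry, exit_l) in sorted((e, x) for x, e in first.items())]
-- ===== Notes on version B (the rewrite author's own statement) =====
-- stated objective: faster
-- what changed: Instead of sorting the whole key set and scanning it with a seen-set, B makes one dict pass over the keys aggregating the minimum entry per exit label and then sorts only the distinct (min_entry, label) pairs.
import Mathlib
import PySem

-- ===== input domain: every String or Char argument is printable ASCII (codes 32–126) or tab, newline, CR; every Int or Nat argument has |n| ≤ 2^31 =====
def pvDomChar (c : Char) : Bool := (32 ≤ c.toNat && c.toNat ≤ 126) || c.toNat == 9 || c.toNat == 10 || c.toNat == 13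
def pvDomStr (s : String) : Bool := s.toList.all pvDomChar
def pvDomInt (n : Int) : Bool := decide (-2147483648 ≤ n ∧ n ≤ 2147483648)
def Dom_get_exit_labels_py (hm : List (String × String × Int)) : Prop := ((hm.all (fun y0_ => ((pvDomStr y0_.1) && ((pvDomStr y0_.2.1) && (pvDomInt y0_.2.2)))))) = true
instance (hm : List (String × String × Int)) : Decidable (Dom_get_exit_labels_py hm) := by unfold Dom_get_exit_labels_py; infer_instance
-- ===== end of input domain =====

-- B replaces A's "sort all (entry, exit) keys, then scan with a seen-set" by "aggregate the
-- minimum entry per exit label in one dict pass, then sort only the distinct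
-- (min_entry, label) pairs" (objective: alternative).

-- hm is the dict with (entry, exit_label) tuple keys; pyKeys ports `hm.keys()`
-- (the input association list is re-associated to key = the (entry, exit_label) pair)
def pyKeys (hm : List (String × String × Int)) : List (String × String) :=
  (PySem.Dict.ofList (hm.map (fun y => ((y.1, y.2.1), y.2.2)))).keys

-- ===== PORT A =====
-- loop body of A: append the exit label of the key if unseen
def aStep (st : List String × PySem.Set String) (k : String × String) :
    List String × PySem.Set String :=
  if k.2 ∈ st.2 then st else (st.1 ++ [k.2], PySem.Set.add st.2 k.2)

def get_exit_labels_py (hm : List (String × String × Int)) : List String :=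
  ((PySem.List.sorted2 (pyKeys hm) (fun k => k.1) (fun k => k.2) false).foldl aStep
    ([], PySem.Set.ofList [])).1

-- ===== PORT B =====
-- loop body of B: keep the smallest entry seen so far for each exit label
def bStep (f : PySem.Dict String String) (k : String × String) : PySem.Dict String String :=
  if !f.contains k.2 || decide (k.1 < f.getD k.2 "") then f.insert k.2 k.1 else f

def get_exit_labels_py_alt (hm : List (String × String × Int)) : List String :=
  let first := (pyKeys hm).foldl bStep PySem.Dict.empty
  (PySem.List.sorted2 (first.items.map (fun p => (p.2, p.1)))
    (fun q => q.1) (fun q => q.2) false).map (fun q => q.2)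

-- ===== PRECONDITION & SPEC =====
def Spec_get_exit_labels_py (hm : List (String × String × Int)) (out : List String) : Prop := out = get_exit_labels_py_alt hm
instance (hm : List (String × String × Int)) (out : List String) : Decidable (Spec_get_exit_labels_py hm out) := by unfold Spec_get_exit_labels_py; infer_instance

-- ===== CLAIM (what is proved, stated in full; the proofs are below) =====
def Claim_equal_get_exit_labels_py : Prop := ∀ (hm : List (String × String × Int)), Dom_get_exit_labels_py hm → Spec_get_exit_labels_py hm (get_exit_labels_py hm)

-- ===== LEMMAS AND PROOFS =====

def mergeMin (o : Option String) (es : List String) : Option String :=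
  es.foldl (fun o e => match o with | none => some e | some c => some (min c e)) o

theorem mergeMin_cons (o : Option String) (e : String) (es : List String) :
    mergeMin o (e :: es)
      = mergeMin (match o with | none => some e | some c => some (min c e)) es := rfl

theorem keys_pyKeys (hm : List (String × String × Int)) :
    pyKeys hm = PySem.List.dedup (hm.map (fun y => (y.1, y.2.1))) := by
  have h : PySem.Dict.ofList (hm.map (fun y => ((y.1, y.2.1), y.2.2)))
      = (hm.map (fun y => ((y.1, y.2.1), y.2.2))).foldl (fun d p => d.insert p.1 p.2)
          PySem.Dict.empty := rfl
  rw [pyKeys, h]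
  have := PySem.Dict.keys_foldl_insert_key (ν := Int)
    (hm.map (fun y => ((y.1, y.2.1), y.2.2))) (fun p => p.1) (fun _ p => p.2) PySem.Dict.empty
  rw [this, PySem.Dict.keys_empty, PySem.Set.update_nil_left, List.map_map,
    ← PySem.List.dedup_eq_ofList]
  rfl

theorem discard_comm {α : Type} [BEq α] (s : PySem.Set α) (a b : α) :
    (s.discard a).discard b = (s.discard b).discard a := by
  simp [PySem.Set.discard, List.filter_filter, Bool.and_comm]

theorem cons_discard_self {α : Type} [BEq α] [LawfulBEq α] (s : PySem.Set α) (a : α) :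
    PySem.Set.discard (a :: s) a = s.discard a := by
  simp [PySem.Set.discard]

theorem cons_discard_ne {α : Type} [BEq α] [LawfulBEq α] (s : PySem.Set α) (a b : α) (h : b ≠ a) :
    PySem.Set.discard (b :: s) a = b :: s.discard a := by
  simp [PySem.Set.discard, h]

theorem discard_discard_self {α : Type} [BEq α] (s : PySem.Set α) (a : α) :
    (s.discard a).discard a = s.discard a := by
  simp [PySem.Set.discard, List.filter_filter]

theorem ofList_filter_ne {α : Type} [BEq α] [LawfulBEq α] (es : List α) (z : α) :
    PySem.Set.ofList (es.filter (fun y => !(y == z))) = (PySem.Set.ofList es).discard z := by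
  induction es with
  | nil => simp [PySem.Set.ofList, PySem.Set.discard, PySem.Set.empty]
  | cons y es ih =>
    by_cases hy : y = z
    · subst hy
      simp only [List.filter_cons, beq_self_eq_true, Bool.not_true, Bool.false_eq_true, if_false]
      rw [ih, PySem.Set.ofList_cons, cons_discard_self, discard_discard_self]
    · have hcond : (!(y == z)) = true := by simp [hy]
      simp only [List.filter_cons, hcond, if_true]
      rw [PySem.Set.ofList_cons, PySem.Set.ofList_cons, ih, cons_discard_ne _ _ _ hy, discard_comm]

theorem dedup_cons {α : Type} [BEq α] [LawfulBEq α] (a : α) (l : List α) :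
    PySem.List.dedup (a :: l) = a :: PySem.Set.discard (PySem.List.dedup l) a := by
  simp [PySem.List.dedup_eq_ofList, PySem.Set.ofList_cons]

theorem mem_discard {α : Type} [BEq α] [LawfulBEq α] (s : PySem.Set α) (z y : α) :
    y ∈ s.discard z ↔ y ∈ s ∧ y ≠ z := by
  simp [PySem.Set.discard]

theorem discard_filter_of_mem (l : List String) (z : String) (es : List String) (hz : z ∈ es) :
    (PySem.Set.discard l z).filter (fun x => decide (x ∉ es)) = l.filter (fun x => decide (x ∉ es)) := by
  rw [PySem.Set.discard, List.filter_filter]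
  apply List.filter_congr
  intro y _
  by_cases h : y = z
  · subst h; simp [hz]
  · simp [h]

theorem discard_filter_of_not_mem (l : List String) (z : String) (es : List String) :
    (PySem.Set.discard l z).filter (fun x => decide (x ∉ es)) = l.filter (fun x => decide (x ∉ es ++ [z])) := by
  rw [PySem.Set.discard, List.filter_filter]
  apply List.filter_congr
  intro y _
  by_cases h1 : y = z <;> by_cases h2 : y ∈ es <;> simp [h1, h2]

theorem foldA_spec (t : List (String × String)) (labels : List String) (es : List String) :
    (t.foldl aStep (labels, PySem.Set.ofList es)).1
      = labels ++ (PySem.List.dedup (t.map Prod.snd)).filter (fun x => decide (x ∉ es)) := by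
  induction t generalizing labels es with
  | nil => simp [PySem.List.dedup, PySem.Set.ofList, PySem.Set.empty]
  | cons k t ih =>
    rw [List.foldl_cons, List.map_cons, dedup_cons, aStep]
    by_cases hmem : k.2 ∈ es
    · rw [if_pos ((PySem.Set.mem_ofList es _).mpr hmem)]
      rw [ih]
      rw [List.filter_cons_of_neg (by simp [hmem]), discard_filter_of_mem _ _ _ hmem]
    · rw [if_neg (fun hc => hmem ((PySem.Set.mem_ofList es _).mp hc))]
      rw [← PySem.Set.ofList_append_singleton]
      rw [ih]
      rw [List.filter_cons_of_pos (by simp [hmem]), discard_filter_of_not_mem]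
      simp
theorem bStep_get?_self (f : PySem.Dict String String) (k : String × String) :
    (bStep f k).get? k.2
      = (match f.get? k.2 with
         | none => some k.1
         | some c => some (min c k.1)) := by
  rw [bStep]
  cases hc : f.contains k.2 with
  | false =>
    have hn : f.get? k.2 = none := by
      rw [PySem.Dict.get?_eq_none_iff_contains]; exact hc
    simp [hn, PySem.Dict.get?_insert_self]
  | true =>
    obtain ⟨c, hcv⟩ : ∃ c, f.get? k.2 = some c := by
      have := PySem.Dict.contains_eq_isSome_get? f k.2
      rw [hc] at this
      exact Option.isSome_iff_exists.mp this.symm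
    have hgd : f.getD k.2 "" = c := by
      rw [PySem.Dict.getD_eq_get?_getD, hcv]; rfl
    by_cases hlt : k.1 < c
    · simp [hgd, hlt, PySem.Dict.get?_insert_self, hcv, min_eq_right (le_of_lt hlt)]
    · simp [hgd, hlt, hcv, min_eq_left (le_of_not_gt hlt)]

theorem bStep_get?_ne (f : PySem.Dict String String) (k : String × String) (x : String)
    (hx : k.2 ≠ x) :
    (bStep f k).get? x = f.get? x := by
  rw [bStep]
  split
  · exact PySem.Dict.get?_insert_of_ne f _ (Ne.symm hx)
  · rfl

theorem foldB_get? (t : List (String × String)) (f : PySem.Dict String String) (x : String) :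
    (t.foldl bStep f).get? x
      = mergeMin (f.get? x) ((t.filter (fun k => k.2 == x)).map Prod.fst) := by
  induction t generalizing f with
  | nil => rfl
  | cons k t ih =>
    rw [List.foldl_cons]
    by_cases hxx : k.2 = x
    · rw [List.filter_cons_of_pos (by simp [hxx]), List.map_cons, mergeMin_cons, ih]
      congr 1
      rw [← hxx, bStep_get?_self f k]
    · rw [List.filter_cons_of_neg (by simp [hxx]), ih, bStep_get?_ne f k x hxx]

theorem bStep_nodup_keys (f : PySem.Dict String String) (k : String × String)
    (h : f.keys.Nodup) : (bStep f k).keys.Nodup := by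
  rw [bStep]
  split
  · exact PySem.Dict.nodup_keys_insert _ _ _ h
  · exact h

theorem foldB_nodup_keys (t : List (String × String)) (f : PySem.Dict String String)
    (h : f.keys.Nodup) : (t.foldl bStep f).keys.Nodup := by
  induction t generalizing f with
  | nil => exact h
  | cons k t ih => exact ih _ (bStep_nodup_keys f k h)

theorem bStep_keys (f : PySem.Dict String String) (k : String × String) :
    (bStep f k).keys = PySem.Set.add f.keys k.2 := by
  rw [bStep]
  have hck : PySem.Set.contains f.keys k.2 = f.contains k.2 := by
    rw [PySem.Set.contains]
    rcases hc : f.contains k.2 with _ | _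
    · simp only [List.contains_eq_mem, decide_eq_false_iff_not]
      intro hmem
      rw [(PySem.Dict.contains_iff_mem_keys f _).mpr hmem] at hc; cases hc
    · simp only [List.contains_eq_mem, decide_eq_true_eq]
      exact (PySem.Dict.contains_iff_mem_keys f _).mp hc
  cases hc : f.contains k.2 with
  | false =>
    rw [if_pos (by simp [hc])]
    rw [PySem.Dict.keys_insert_of_not_contains f _ hc, PySem.Set.add, hck, hc, if_neg (by simp)]
  | true =>
    have hadd : PySem.Set.add f.keys k.2 = f.keys := by
      rw [PySem.Set.add, hck, hc, if_pos rfl]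
    split
    · rw [PySem.Dict.keys_insert_of_contains f _ hc, hadd]
    · rw [hadd]

theorem foldB_keys (t : List (String × String)) (f : PySem.Dict String String) :
    (t.foldl bStep f).keys = PySem.Set.update f.keys (t.map Prod.snd) := by
  induction t generalizing f with
  | nil => rfl
  | cons k t ih =>
    rw [List.foldl_cons, List.map_cons, PySem.Set.update_cons, ih, bStep_keys f k]

theorem mergeMin_some (es : List String) (c : String) :
    ∃ m, mergeMin (some c) es = some m ∧ (m = c ∨ m ∈ es) ∧ m ≤ c ∧ ∀ e ∈ es, m ≤ e := by
  induction es generalizing c with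
  | nil => exact ⟨c, rfl, Or.inl rfl, le_refl c, by simp⟩
  | cons e es ih =>
    obtain ⟨m, hm, hmem, hle, hball⟩ := ih (min c e)
    refine ⟨m, hm, ?_, le_trans hle (min_le_left c e), ?_⟩
    · rcases hmem with h | h
      · rcases min_choice c e with hc | hc <;> rw [hc] at h <;> simp [h]
      · exact Or.inr (by simp [h])
    · intro e' he'
      rcases List.mem_cons.mp he' with h | h
      · rw [h] at *; exact le_trans hle (min_le_right c e)
      · exact hball e' h

theorem mergeMin_nonempty (es : List String) (hne : es ≠ []) :
    ∃ m, mergeMin none es = some m ∧ m ∈ es ∧ ∀ e ∈ es, m ≤ e := by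
  cases es with
  | nil => exact absurd rfl hne
  | cons e es =>
    obtain ⟨m, hm, hmem, hle, hball⟩ := mergeMin_some es e
    refine ⟨m, hm, ?_, ?_⟩
    · rcases hmem with h | h <;> simp [h]
    · intro e' he'
      rcases List.mem_cons.mp he' with h | h
      · rw [h]; exact hle
      · exact hball e' h

theorem sorted2_eq_sorted_lex {α : Type} (xs : List α) (k1 k2 : α → String) :
    PySem.List.sorted2 xs k1 k2 false
      = PySem.List.sorted xs (fun q => toLex (k1 q, k2 q)) false := by
  rw [PySem.List.sorted_eq_foldl_insertBy]
  simp only [PySem.List.sorted2]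
  have hbe : (fun (a b : α) =>
        (decide (k1 a < k1 b) || (!decide (k1 b < k1 a) && decide (k2 a < k2 b))))
      = (fun (a b : α) => decide ((fun q => toLex (k1 q, k2 q)) a < (fun q => toLex (k1 q, k2 q)) b)) := by
    funext a b
    by_cases h1 : k1 a < k1 b
    · simp [h1, Prod.Lex.toLex_lt_toLex]
    · by_cases h2 : k1 b < k1 a
      · have hne : ¬ k1 a = k1 b := fun h => absurd (h ▸ h2) (lt_irrefl _)
        simp [h1, h2, Prod.Lex.toLex_lt_toLex, hne]
      · have heq : k1 a = k1 b := le_antisymm (le_of_not_gt h2) (le_of_not_gt h1)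
        by_cases h3 : k2 a < k2 b <;> simp [h3, Prod.Lex.toLex_lt_toLex, heq]
  rw [hbe]
  simp
def Hg (ks : List (String × String)) (g : String → String) : Prop :=
  ∀ x ∈ PySem.List.dedup (ks.map Prod.snd),
    ∃ k ∈ ks, k.2 = x ∧ g x = k.1 ∧ ∀ k' ∈ ks, k'.2 = x → k.1 ≤ k'.1

theorem dedup_filter_snd (t : List (String × String)) (z : String) :
    PySem.List.dedup ((t.filter (fun k' => !(k'.2 == z))).map Prod.snd)
      = PySem.Set.discard (PySem.List.dedup (t.map Prod.snd)) z := by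
  rw [PySem.List.dedup_eq_ofList, PySem.List.dedup_eq_ofList, ← ofList_filter_ne]
  rw [List.filter_map]
  rfl

theorem pairwise_L_aux (n : Nat) : ∀ (ks : List (String × String)), ks.length ≤ n →
    ks.Pairwise (fun a b => toLex (a.1, a.2) < toLex (b.1, b.2)) →
    ∀ (g : String → String), Hg ks g →
    (PySem.List.dedup (ks.map Prod.snd)).Pairwise
      (fun x y => toLex (g x, x) < toLex (g y, y)) := by
  induction n with
  | zero =>
    intro ks hlen _ g _
    rw [List.eq_nil_of_length_eq_zero (Nat.le_zero.mp hlen)]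
    simp [PySem.List.dedup, PySem.Set.ofList, PySem.Set.empty]
  | succ n ihn =>
    intro ks hlen hs g hg
    cases ks with
    | nil => simp [PySem.List.dedup, PySem.Set.ofList, PySem.Set.empty]
    | cons k t =>
      rw [List.map_cons, dedup_cons]
      have hmemx0 : k.2 ∈ PySem.List.dedup ((k :: t).map Prod.snd) := by
        rw [PySem.List.dedup_eq_ofList, PySem.Set.mem_ofList]
        exact List.mem_map.mpr ⟨k, by simp⟩
      obtain ⟨kx, hkxmem, hkxex, hkxg, hkxmin⟩ := hg k.2 hmemx0
      constructor
      · -- head: every later label is lex-greater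
        intro y hy
        obtain ⟨hyD, hyne⟩ := (mem_discard _ _ _).mp hy
        have hyin : y ∈ PySem.List.dedup ((k :: t).map Prod.snd) := by
          rw [PySem.List.dedup_eq_ofList, PySem.Set.mem_ofList] at hyD ⊢
          rcases List.mem_map.mp hyD with ⟨k', hk', hk'e⟩
          exact List.mem_map.mpr ⟨k', by simp [hk'], hk'e⟩
        obtain ⟨ky, hkymem, hkyex, hkyg, _⟩ := hg y hyin
        have hkyne : ky ≠ k := fun h => hyne (by rw [← hkyex, h])
        have hkyt : ky ∈ t := by
          rcases List.mem_cons.mp hkymem with h | h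
          · exact absurd h hkyne
          · exact h
        have hklt : toLex (k.1, k.2) < toLex (ky.1, ky.2) := (List.pairwise_cons.mp hs).1 ky hkyt
        have hexle : kx.1 ≤ k.1 := hkxmin k (by simp) rfl
        rw [hkxg, hkyg, ← hkyex, Prod.Lex.toLex_lt_toLex]
        rw [Prod.Lex.toLex_lt_toLex] at hklt
        rcases hklt with h | ⟨heq, hlt2⟩
        · exact Or.inl (lt_of_le_of_lt hexle h)
        · rcases lt_or_eq_of_le hexle with h' | h'
          · exact Or.inl (h'.trans_eq heq)
          · exact Or.inr ⟨h'.trans heq, hlt2⟩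
      · -- tail: IH on t with the k.2 labels filtered out
        rw [← dedup_filter_snd t k.2]
        apply ihn
        · exact le_trans (List.length_filter_le _ _) (Nat.le_of_succ_le_succ hlen)
        · exact List.Pairwise.sublist List.filter_sublist (List.pairwise_cons.mp hs).2
        · -- Hg for the filtered list
          intro x hx
          have hxne : x ≠ k.2 := by
            rw [dedup_filter_snd t k.2] at hx
            exact ((mem_discard _ _ _).mp hx).2
          have hxin : x ∈ PySem.List.dedup ((k :: t).map Prod.snd) := by
            rw [dedup_filter_snd t k.2] at hx
            have hxD := ((mem_discard _ _ _).mp hx).1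
            rw [PySem.List.dedup_eq_ofList, PySem.Set.mem_ofList] at hxD ⊢
            rcases List.mem_map.mp hxD with ⟨k', hk', hk'e⟩
            exact List.mem_map.mpr ⟨k', by simp [hk'], hk'e⟩
          obtain ⟨k'', hk''mem, hk''ex, hk''g, hk''min⟩ := hg x hxin
          have hk''ne : k'' ≠ k := fun h => hxne (by rw [← hk''ex, h])
          have hk''t : k'' ∈ t := by
            rcases List.mem_cons.mp hk''mem with h | h
            · exact absurd h hk''ne
            · exact h
          refine ⟨k'', List.mem_filter.mpr ⟨hk''t, by simp [hk''ex, hxne]⟩, hk''ex, hk''g, ?_⟩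
          intro k3 hk3 hk3x
          exact hk''min k3 (by simp [(List.mem_filter.mp hk3).1]) hk3x

theorem pairwise_L (ks : List (String × String))
    (hs : ks.Pairwise (fun a b => toLex (a.1, a.2) < toLex (b.1, b.2)))
    (g : String → String) (hg : Hg ks g) :
    (PySem.List.dedup (ks.map Prod.snd)).Pairwise
      (fun x y => toLex (g x, x) < toLex (g y, y)) :=
  pairwise_L_aux ks.length ks (le_refl _) hs g hg
theorem main_eq (hm : List (String × String × Int)) :
    get_exit_labels_py hm = get_exit_labels_py_alt hm := by
  set kd := pyKeys hm with hkddef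
  have hkdnd : kd.Nodup := by
    rw [hkddef, keys_pyKeys, PySem.List.dedup_eq_ofList]
    exact PySem.Set.nodup_ofList _
  set ks := PySem.List.sorted kd (fun k => toLex (k.1, k.2)) false with hksdef
  have hks2 : PySem.List.sorted2 kd (fun k => k.1) (fun k => k.2) false = ks :=
    sorted2_eq_sorted_lex kd _ _
  have hksnd : ks.Nodup := by
    rw [hksdef]
    exact (PySem.List.sorted_perm _ _ _).nodup_iff.mpr hkdnd
  have hs : ks.Pairwise (fun a b => toLex (a.1, a.2) < toLex (b.1, b.2)) := by
    have hle := PySem.List.sorted_pairwise kd (fun k => toLex (k.1, k.2))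
    rw [← hksdef] at hle
    have := List.Pairwise.and hle hksnd
    apply this.imp
    rintro a b ⟨h1, h2⟩
    rcases lt_or_eq_of_le h1 with h | h
    · exact h
    · exfalso
      apply h2
      have := toLex.injective h
      calc a = (a.1, a.2) := rfl
        _ = (b.1, b.2) := this
        _ = b := rfl
  -- A side
  have hA : get_exit_labels_py hm = PySem.List.dedup (ks.map Prod.snd) := by
    rw [get_exit_labels_py, ← hkddef, hks2]
    rw [show (PySem.Set.ofList [] : PySem.Set String) = PySem.Set.ofList ([] : List String) from rfl]
    rw [foldA_spec ks [] []]
    simp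
  -- B side
  set first := kd.foldl bStep PySem.Dict.empty with hfirst
  have hhkeys : first.keys = PySem.List.dedup (kd.map Prod.snd) := by
    rw [hfirst, foldB_keys kd PySem.Dict.empty, PySem.Dict.keys_empty,
      PySem.Set.update_nil_left, PySem.List.dedup_eq_ofList]
  have hnodupK : first.keys.Nodup :=
    foldB_nodup_keys kd PySem.Dict.empty PySem.Dict.nodup_keys_empty
  set g : String → String := fun x => first.getD x "" with hgdef
  have hitems : first.items.map (fun p => (p.2, p.1))
      = (PySem.List.dedup (kd.map Prod.snd)).map (fun x => (g x, x)) := by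
    rw [PySem.Dict.items_eq_map_keys first hnodupK "", hhkeys, List.map_map]
    rfl
  have hDD' : ((PySem.List.dedup (ks.map Prod.snd)).map (fun x => (g x, x))).Perm
      ((PySem.List.dedup (kd.map Prod.snd)).map (fun x => (g x, x))) := by
    apply List.Perm.map
    rw [List.perm_ext_iff_of_nodup
      (by rw [PySem.List.dedup_eq_ofList]; exact PySem.Set.nodup_ofList _)
      (by rw [PySem.List.dedup_eq_ofList]; exact PySem.Set.nodup_ofList _)]
    intro a
    simp only [PySem.List.dedup_eq_ofList, PySem.Set.mem_ofList, List.mem_map]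
    constructor
    · rintro ⟨k, hk, hke⟩
      exact ⟨k, (PySem.List.mem_sorted _ _ _ _).mp hk, hke⟩
    · rintro ⟨k, hk, hke⟩
      exact ⟨k, (PySem.List.mem_sorted _ _ _ _).mpr hk, hke⟩
  have hgg : Hg ks g := by
    intro x hx
    have hget : first.get? x
        = mergeMin none ((kd.filter (fun k => k.2 == x)).map Prod.fst) := by
      rw [hfirst, foldB_get? kd PySem.Dict.empty x, PySem.Dict.get?_empty]
    obtain ⟨k0, hk0ks, hk0e⟩ : ∃ k0 ∈ ks, k0.2 = x := by
      rw [PySem.List.dedup_eq_ofList, PySem.Set.mem_ofList] at hx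
      rcases List.mem_map.mp hx with ⟨k0, hk0, hk0e⟩
      exact ⟨k0, hk0, hk0e⟩
    have hne : ((kd.filter (fun k => k.2 == x)).map Prod.fst) ≠ [] := by
      apply List.ne_nil_of_mem (a := k0.1)
      exact List.mem_map.mpr ⟨k0, List.mem_filter.mpr
        ⟨(PySem.List.mem_sorted _ _ _ _).mp hk0ks, by simp [hk0e]⟩, rfl⟩
    obtain ⟨m, hmeq, hmmem, hmmin⟩ := mergeMin_nonempty _ hne
    have hgx : g x = m := by
      rw [hgdef]
      simp only
      rw [PySem.Dict.getD_eq_get?_getD, hget, hmeq]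
      rfl
    rcases List.mem_map.mp hmmem with ⟨kw, hkwf, hkwe⟩
    have hkwkd := (List.mem_filter.mp hkwf).1
    have hkwx : kw.2 = x := by
      have := (List.mem_filter.mp hkwf).2
      simpa using this
    refine ⟨kw, (PySem.List.mem_sorted _ _ _ _).mpr hkwkd, hkwx, by rw [hgx, hkwe], ?_⟩
    intro k' hk' hk'x
    rw [hkwe]
    exact hmmin k'.1 (List.mem_map.mpr ⟨k', List.mem_filter.mpr
      ⟨(PySem.List.mem_sorted _ _ _ _).mp hk', by simp [hk'x]⟩, rfl⟩)
  have hpair := pairwise_L ks hs g hgg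
  have hsorted : PySem.List.sorted2 (first.items.map (fun p => (p.2, p.1)))
      (fun q => q.1) (fun q => q.2) false
      = (PySem.List.dedup (ks.map Prod.snd)).map (fun x => (g x, x)) := by
    rw [sorted2_eq_sorted_lex]
    apply PySem.List.sorted_eq_of_perm_of_pairwise_lt
    · rw [hitems]
      exact hDD'
    · rw [List.pairwise_map]
      exact hpair
  have hB : get_exit_labels_py_alt hm
      = PySem.List.dedup (ks.map Prod.snd) := by
    show (PySem.List.sorted2 ((kd.foldl bStep PySem.Dict.empty).items.map (fun p => (p.2, p.1)))
        (fun q => q.1) (fun q => q.2) false).map (fun q => q.2)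
      = PySem.List.dedup (ks.map Prod.snd)
    rw [← hfirst, hsorted, List.map_map]
    simp [Function.comp_def]
  rw [hA, hB]

-- ===== VERDICT (by name: the statement is the Claim_ definition above) =====
theorem get_exit_labels_py_spec : Claim_equal_get_exit_labels_py := by
  intro hm _hdom
  show get_exit_labels_py hm = get_exit_labels_py_alt hm
  exact main_eq hm
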